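-- pv_equiv track=rewrite | github.com/ethahtz/multilingual_othello | ft_experiment.py | countPrefix
-- ===== SOURCE A (Python) =====
-- def countPrefix(seqs: list, prefix: list):
--     """
--     Return the number of prefix-filtered sequences and the index of the first
--     and last sequence that has the prefix. Since the synthetic sequences are
--     sorted, sequences withe the same prefix are contiguous.
--
--     Args:
--         seqs (list): List of (sorted) othello game sequences
--         prefix (list): Prefix to filter the sequences
--
--     Returns:
--         int: Number of sequences with the prefix
--         int: Index of the first sequence with the prefix
--         int: Index of the last sequence with the prefix
--     """
--     idx, count = 0, 0
--     left = None
--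
--     while idx < len(seqs) and seqs[idx][:len(prefix)] != prefix:
--         idx += 1
--
--     left = idx
--
--     while idx < len(seqs) and seqs[idx][:len(prefix)] == prefix:
--         count += 1
--         idx += 1
--
--     return count, left, idx
-- ===== SOURCE B (Python) =====
-- def countPrefix(seqs: list, prefix: list):
--     m = len(prefix)
--     # run-length encode the match/non-match flags, built back to front
--     runs = []
--     for s in reversed(seqs):
--         f = (s[:m] == prefix)
--         if runs and runs[0][0] == f:
--             runs[0] = (f, runs[0][1] + 1)
--         else:
--             runs.insert(0, (f, 1))
--     # the first matching run gives (count, left, right)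
--     pos = 0
--     for f, n in runs:
--         if f:
--             return n, pos, pos + n
--         pos += n
--     return 0, len(seqs), len(seqs)
-- ===== Notes on version B (the rewrite author's own statement) =====
-- stated objective: alternative
-- what changed: A makes two stateful while-loop scans with a shared index (skip non-matches, then count the run); B run-length-encodes the match flags and reads (count, left, right) off the first matching run.
import Mathlib
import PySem

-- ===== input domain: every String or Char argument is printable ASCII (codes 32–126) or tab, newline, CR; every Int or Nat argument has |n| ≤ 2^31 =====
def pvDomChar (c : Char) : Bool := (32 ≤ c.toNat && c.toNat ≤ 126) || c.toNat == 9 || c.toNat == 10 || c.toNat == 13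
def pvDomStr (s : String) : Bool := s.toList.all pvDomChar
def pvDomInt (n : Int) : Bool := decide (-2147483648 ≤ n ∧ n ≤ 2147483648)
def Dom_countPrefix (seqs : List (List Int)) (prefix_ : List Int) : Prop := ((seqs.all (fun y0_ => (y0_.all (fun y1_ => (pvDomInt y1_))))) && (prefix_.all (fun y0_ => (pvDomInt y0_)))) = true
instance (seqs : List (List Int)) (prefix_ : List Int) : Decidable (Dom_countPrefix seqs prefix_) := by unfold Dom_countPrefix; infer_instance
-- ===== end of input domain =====

-- B replaces A's two stateful while-loop scans by a run-length encoding of the match flags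
-- and reads (count, left, right) off the first matching run; same result, different structure.

-- ===== PORT A =====
-- first while loop: 'while idx < len(seqs) and seqs[idx][:len(prefix)] != prefix: idx += 1'
def pvALoop1 (rest : List (List Int)) (prefix_ : List Int) (idx : Int) : Int × List (List Int) :=
  match rest with
  | [] => (idx, [])
  | s :: t =>
    if PySem.List.slice s none (some (prefix_.length : Int)) ≠ prefix_ then
      pvALoop1 t prefix_ (idx + 1)
    else (idx, s :: t)

-- second while loop: 'while idx < len(seqs) and seqs[idx][:len(prefix)] == prefix: count += 1; idx += 1'
def pvALoop2 (rest : List (List Int)) (prefix_ : List Int) (count : Int) (idx : Int) : Int × Int :=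
  match rest with
  | [] => (count, idx)
  | s :: t =>
    if PySem.List.slice s none (some (prefix_.length : Int)) = prefix_ then
      pvALoop2 t prefix_ (count + 1) (idx + 1)
    else (count, idx)

def countPrefix (seqs : List (List Int)) (prefix_ : List Int) : Int × Int × Int :=
  let r1 := pvALoop1 seqs prefix_ 0
  let left := r1.1
  let r2 := pvALoop2 r1.2 prefix_ 0 left
  (r2.1, left, r2.2)

-- ===== PORT B =====
-- the loop body: 'if runs and runs[0][0] == f: runs[0] = (f, runs[0][1] + 1) else: runs.insert(0, (f, 1))'
def pvBMerge (f : Bool) : List (Bool × Int) → List (Bool × Int)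
  | (g, k) :: t => if g == f then (f, k + 1) :: t else (f, 1) :: (g, k) :: t
  | [] => [(f, 1)]

-- 'for s in reversed(seqs): …' building runs at the front = a fold from the right
def pvBRle (seqs : List (List Int)) (m : Int) (prefix_ : List Int) : List (Bool × Int) :=
  match seqs with
  | [] => []
  | s :: rest => pvBMerge (PySem.List.slice s none (some m) == prefix_) (pvBRle rest m prefix_)

-- 'pos = 0; for f, n in runs: if f: return n, pos, pos + n; pos += n; return 0, len(seqs), len(seqs)'
def pvBScan : List (Bool × Int) → Int → Int → Int × Int × Int
  | [], _, n => (0, n, n)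
  | (f, k) :: t, pos, n => if f then (k, pos, pos + k) else pvBScan t (pos + k) n

def countPrefix_alt (seqs : List (List Int)) (prefix_ : List Int) : Int × Int × Int :=
  let m : Int := (prefix_.length : Int)
  pvBScan (pvBRle seqs m prefix_) 0 (seqs.length : Int)

-- ===== PRECONDITION & SPEC =====
def Spec_countPrefix (seqs : List (List Int)) (prefix_ : List Int) (out : Int × Int × Int) : Prop := out = countPrefix_alt seqs prefix_
instance (seqs : List (List Int)) (prefix_ : List Int) (out : Int × Int × Int) : Decidable (Spec_countPrefix seqs prefix_ out) := by unfold Spec_countPrefix; infer_instance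

-- ===== CLAIM (what is proved, stated in full; the proofs are below) =====
def Claim_equal_countPrefix : Prop := ∀ (seqs : List (List Int)) (prefix_ : List Int), Dom_countPrefix seqs prefix_ → Spec_countPrefix seqs prefix_ (countPrefix seqs prefix_)

-- ===== LEMMAS AND PROOFS =====

-- whether a sequence carries the prefix (the comparison both Pythons make)
def pvPb (prefix_ : List Int) (s : List Int) : Bool := s.take prefix_.length == prefix_

theorem pvALoop1_eq (prefix_ : List Int) : ∀ (l : List (List Int)) (i : Int),
    pvALoop1 l prefix_ i =
      (i + ((l.takeWhile (fun s => ! pvPb prefix_ s)).length : Int),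
       l.dropWhile (fun s => ! pvPb prefix_ s)) := by
  intro l
  induction l with
  | nil => intro i; simp [pvALoop1]
  | cons s t ih =>
    intro i
    by_cases h : s.take prefix_.length = prefix_ <;>
      simp [pvALoop1, PySem.List.slice_to_natCast, pvPb, h, ih] <;> omega

theorem pvALoop2_eq (prefix_ : List Int) : ∀ (l : List (List Int)) (c i : Int),
    pvALoop2 l prefix_ c i =
      (c + ((l.takeWhile (pvPb prefix_)).length : Int),
       i + ((l.takeWhile (pvPb prefix_)).length : Int)) := by
  intro l
  induction l with
  | nil => intro c i; simp [pvALoop2]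
  | cons s t ih =>
    intro c i
    by_cases h : s.take prefix_.length = prefix_ <;>
      simp [pvALoop2, PySem.List.slice_to_natCast, pvPb, h, ih] <;>
      constructor <;> omega

-- A in closed form: (|run|, |skipped|, |skipped| + |run|)
theorem pvA_closed (seqs : List (List Int)) (prefix_ : List Int) :
    countPrefix seqs prefix_ =
      ((((seqs.dropWhile (fun s => ! pvPb prefix_ s)).takeWhile (pvPb prefix_)).length : Int),
       ((seqs.takeWhile (fun s => ! pvPb prefix_ s)).length : Int),
       ((seqs.takeWhile (fun s => ! pvPb prefix_ s)).length : Int)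
         + (((seqs.dropWhile (fun s => ! pvPb prefix_ s)).takeWhile (pvPb prefix_)).length : Int)) := by
  simp only [countPrefix, pvALoop1_eq, pvALoop2_eq]
  simp

-- the RLE of a nonempty list is nonempty
theorem pvBRle_cons_ne (m : Int) (prefix_ : List Int) (s : List Int) (l : List (List Int)) :
    pvBRle (s :: l) m prefix_ ≠ [] := by
  simp only [pvBRle]
  cases pvBRle l m prefix_ with
  | nil => simp [pvBMerge]
  | cons p t =>
    obtain ⟨g, k⟩ := p
    simp only [pvBMerge]
    split <;> simp

-- the head flag of the RLE is the flag of the head element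
theorem pvBRle_head (prefix_ : List Int) :
    ∀ (l : List (List Int)) (g : Bool) (k : Int) (t : List (Bool × Int)),
      pvBRle l (prefix_.length : Int) prefix_ = (g, k) :: t →
      ∃ s l', l = s :: l' ∧ pvPb prefix_ s = g := by
  intro l g k t h
  cases l with
  | nil => simp [pvBRle] at h
  | cons s l' =>
    refine ⟨s, l', rfl, ?_⟩
    simp only [pvBRle, PySem.List.slice_to_natCast] at h
    cases hr : pvBRle l' (prefix_.length : Int) prefix_ with
    | nil =>
      rw [hr] at h
      simp only [pvBMerge, List.cons.injEq, Prod.mk.injEq] at h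
      simp [pvPb, h.1.1]
    | cons p t'
    =>
      obtain ⟨g', k'⟩ := p
      rw [hr] at h
      simp only [pvBMerge] at h
      split at h <;>
        simp only [List.cons.injEq, Prod.mk.injEq] at h <;>
        simp [pvPb, h.1.1]

-- main invariant: scanning the RLE of l from offset pos computes A's closed form,
-- falling back to (0, n, n) when no element of l matches
theorem pvBScan_rle (prefix_ : List Int) (n : Int) :
    ∀ (l : List (List Int)) (pos : Int),
      pvBScan (pvBRle l (prefix_.length : Int) prefix_) pos n =
        if l.any (pvPb prefix_) then
          ((((l.dropWhile (fun s => ! pvPb prefix_ s)).takeWhile (pvPb prefix_)).length : Int),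
           pos + ((l.takeWhile (fun s => ! pvPb prefix_ s)).length : Int),
           pos + ((l.takeWhile (fun s => ! pvPb prefix_ s)).length : Int)
             + (((l.dropWhile (fun s => ! pvPb prefix_ s)).takeWhile (pvPb prefix_)).length : Int))
        else (0, n, n) := by
  intro l
  induction l with
  | nil => intro pos; simp [pvBRle, pvBScan]
  | cons s l' ih =>
    intro pos
    by_cases hf : pvPb prefix_ s = true
    · -- head matches: left run starts here
      have hf' : s.take prefix_.length = prefix_ := by simpa [pvPb] using hf
      simp only [pvBRle, PySem.List.slice_to_natCast]
      cases hr : pvBRle l' (prefix_.length : Int) prefix_ with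
      | nil =>
        have hl' : l' = [] := by
          cases l' with
          | nil => rfl
          | cons a b => exact absurd hr (pvBRle_cons_ne _ _ a b)
        subst hl'
        simp [pvBMerge, pvBScan, hf', pvPb]
      | cons p t =>
        obtain ⟨g, k⟩ := p
        obtain ⟨s', l'', hl'', hg⟩ := pvBRle_head prefix_ l' g k t hr
        by_cases hgf : g = true
        · -- merge: head of l' also matches
          subst hgf
          have hg' : pvPb prefix_ s' = true := hg
          have := ih pos
          rw [hr] at this
          simp only [pvBScan, if_true] at this
          have hany : l'.any (pvPb prefix_) = true := by
            subst hl''; simp [hg']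
          rw [if_pos hany] at this
          have htw : l'.takeWhile (fun s => ! pvPb prefix_ s) = [] := by
            subst hl''; simp [List.takeWhile, hg']
          have hdw : l'.dropWhile (fun s => ! pvPb prefix_ s) = l' := by
            subst hl''; simp [List.dropWhile, hg']
          rw [htw, hdw] at this
          have hk : k = ((l'.takeWhile (pvPb prefix_)).length : Int) := by
            have := congrArg Prod.fst this; simpa using this
          have hbm : pvBMerge ((s.take prefix_.length : List Int) == prefix_) ((true, k) :: t)
              = (((s.take prefix_.length : List Int) == prefix_), k + 1) :: t := by
            simp [pvBMerge, hf']
          rw [hbm]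
          have hsc : pvBScan ((((s.take prefix_.length : List Int) == prefix_), k + 1) :: t) pos n
              = (k + 1, pos, pos + (k + 1)) := by
            simp [pvBScan, hf']
          rw [hsc, if_pos (show (s :: l').any (pvPb prefix_) = true by simp [hf])]
          have e1 : (s :: l').dropWhile (fun s => ! pvPb prefix_ s) = s :: l' := by
            simp [hf]
          have e2 : (s :: l').takeWhile (fun s => ! pvPb prefix_ s) = [] := by
            simp [hf]
          have e3 : (s :: l').takeWhile (pvPb prefix_) = s :: l'.takeWhile (pvPb prefix_) := by
            simp [hf]
          rw [e1, e2, e3]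
          simp only [List.length_cons, List.length_nil, Nat.cast_add, Nat.cast_one, Nat.cast_zero]
          rw [Prod.mk.injEq, Prod.mk.injEq]
          refine ⟨by omega, by omega, by omega⟩
        · -- no merge: head of l' does not match
          have hgt : g = false := by cases g with | false => rfl | true => exact absurd rfl hgf
          subst hgt
          have hg' : pvPb prefix_ s' = false := by rw [← hg]
          simp only [pvBMerge]
          rw [if_neg (by simp [hf'])]
          simp only [pvBScan]
          rw [if_pos (by simp [hf'])]
          have hany2 : (s :: l').any (pvPb prefix_) = true := by simp [hf]
          rw [if_pos hany2]
          have htw2 : l'.takeWhile (pvPb prefix_) = [] := by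
            subst hl''; simp [List.takeWhile, hg']
          simp [List.takeWhile, List.dropWhile, hf, htw2]
    · -- head does not match: it is skipped
      have hfb : pvPb prefix_ s = false := by simpa using hf
      have hf' : ¬ (s.take prefix_.length = prefix_) := by simpa [pvPb] using hfb
      have hstep : pvBScan (pvBRle (s :: l') (prefix_.length : Int) prefix_) pos n =
          pvBScan (pvBRle l' (prefix_.length : Int) prefix_) (pos + 1) n := by
        simp only [pvBRle, PySem.List.slice_to_natCast]
        cases hr : pvBRle l' (prefix_.length : Int) prefix_ with
        | nil => simp [pvBMerge, pvBScan, hf']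
        | cons p t =>
          obtain ⟨g, k⟩ := p
          by_cases hgf : g = true
          · subst hgf
            simp only [pvBMerge]
            rw [if_neg (by simp [hf'])]
            simp [pvBScan, hf']
          · have hgt : g = false := by cases g with | false => rfl | true => exact absurd rfl hgf
            subst hgt
            simp only [pvBMerge]
            rw [if_pos (by simp [hf'])]
            simp only [pvBScan]
            rw [if_neg (by simp [hf']), if_neg (by simp)]
            congr 1
            omega
      rw [hstep, ih (pos + 1)]
      have hanyeq : (s :: l').any (pvPb prefix_) = l'.any (pvPb prefix_) := by
        simp [hfb]
      rw [hanyeq]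
      by_cases hany : l'.any (pvPb prefix_) = true
      · rw [if_pos hany, if_pos hany]
        simp only [List.takeWhile, List.dropWhile, hfb, Bool.not_false, List.length_cons]
        push_cast
        refine congrArg₂ Prod.mk rfl (congrArg₂ Prod.mk (by omega) (by omega))
      · rw [if_neg hany, if_neg hany]

-- if nothing matches, everything is skipped
theorem pvTakeWhile_all (prefix_ : List Int) :
    ∀ (l : List (List Int)), l.any (pvPb prefix_) = false →
      l.takeWhile (fun s => ! pvPb prefix_ s) = l := by
  intro l h
  apply List.takeWhile_eq_self_iff.mpr
  intro s hs
  simp only [List.any_eq_false] at h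
  simp [h s hs]

-- ===== VERDICT (by name: the statement is the Claim_ definition above) =====
theorem countPrefix_spec : Claim_equal_countPrefix := by
  intro seqs prefix_ _
  unfold Spec_countPrefix
  rw [pvA_closed]
  show _ = countPrefix_alt seqs prefix_
  unfold countPrefix_alt
  rw [pvBScan_rle]
  by_cases hany : seqs.any (pvPb prefix_) = true
  · rw [if_pos hany]; simp
  · rw [if_neg hany]
    have h1 := pvTakeWhile_all prefix_ seqs (by simpa using hany)
    have h2 : seqs.dropWhile (fun s => ! pvPb prefix_ s) = [] := by
      rw [List.dropWhile_eq_nil_iff]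
      intro x hx
      have hall : ∀ s ∈ seqs, pvPb prefix_ s = false := by simpa using hany
      simp [hall x hx]
    rw [h1, h2]
    simp
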